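-- pv_equiv track=rewrite | github.com/havokzero/Test1 | main7.py | outline_block
-- ===== SOURCE A (Python) =====
-- from typing import List, Tuple, Optional
--
-- def pad_block(block: List[str], width:int) -> List[str]:
--     return [line.ljust(width) for line in block]
--
-- def outline_block(block: List[str]) -> List[str]:
--     h, w = len(block), max((len(l) for l in block), default=0)
--     pad = pad_block(block, w)
--     out = [list(row) for row in pad]
--     for y in range(h):
--         for x in range(w):
--             if pad[y][x] != " ":
--                 continue
--             # if any neighbor is non-space -> outline dot
--             found = False
--             for dy in (-1,0,1):
--                 for dx in (-1,0,1):
--                     if dy == 0 and dx == 0: continue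
--                     ny, nx = y+dy, x+dx
--                     if 0 <= ny < h and 0 <= nx < w and pad[ny][nx] != " ":
--                         out[y][x] = "·"
--                         found = True
--                         break
--                 if found: break
--     return ["".join(row) for row in out]
-- ===== SOURCE B (Python) =====
-- from typing import List
--
-- def outline_block(block: List[str]) -> List[str]:
--     # Scatter approach: instead of asking each space cell whether it has a
--     # non-space neighbor, walk over the non-space source cells once and
--     # stamp a dot onto every in-bounds neighboring space cell.
--     h = len(block)
--     w = max((len(l) for l in block), default=0)
--     pad = [line.ljust(w) for line in block]
--     out = [list(row) for row in pad]
--     offsets = [(-1, -1), (-1, 0), (-1, 1), (0, -1), (0, 1), (1, -1), (1, 0), (1, 1)]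
--     for y in range(h):
--         for x in range(w):
--             if pad[y][x] == " ":
--                 continue
--             for dy, dx in offsets:
--                 ny, nx = y + dy, x + dx
--                 if 0 <= ny < h and 0 <= nx < w and pad[ny][nx] == " ":
--                     out[ny][nx] = "·"
--     return ["".join(r) for r in out]
-- ===== Notes on version B (the rewrite author's own statement) =====
-- stated objective: alternative
-- what changed: Replaces the gather pass (each space cell scans its 8 neighbors with a found-flag/break) by a scatter pass: iterate the non-space source cells and stamp a dot onto each in-bounds neighboring space cell.
import Mathlib
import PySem

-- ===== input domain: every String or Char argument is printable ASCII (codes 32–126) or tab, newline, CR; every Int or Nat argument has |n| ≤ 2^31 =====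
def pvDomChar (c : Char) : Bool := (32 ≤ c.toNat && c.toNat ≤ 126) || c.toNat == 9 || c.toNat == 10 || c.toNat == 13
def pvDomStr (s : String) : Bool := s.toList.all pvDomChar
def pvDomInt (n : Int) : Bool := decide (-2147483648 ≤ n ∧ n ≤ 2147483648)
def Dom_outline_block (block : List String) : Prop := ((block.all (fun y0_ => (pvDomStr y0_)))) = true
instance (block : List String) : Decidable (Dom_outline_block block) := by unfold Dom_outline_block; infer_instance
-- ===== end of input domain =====

-- B replaces A's gather pass (per space cell, scan the 8 neighbors with a found-flag/break)
-- by a scatter pass (per non-space source cell, stamp a dot on each in-bounds neighboring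
-- space cell); same result, objective: alternative decomposition.

-- cell read `g[y][x]` / cell write `g[y][x] = c` on a rectangular grid; both ports use them
-- only with in-bounds indices, where getD/set are exactly Python's subscript
def getcg (g : List (List Char)) (y x : Nat) : Char := (g.getD y []).getD x ' '
def setcg (g : List (List Char)) (y x : Nat) (c : Char) : List (List Char) :=
  g.set y ((g.getD y []).set x c)

-- ===== PORT A =====
-- `line.ljust(width)`: exact — pad with spaces up to `width` characters
def pad_block (block : List String) (width : Nat) : List String :=
  block.map (fun line => String.ofList (line.toList ++ List.replicate (width - line.toList.length) ' '))

def outline_block (block : List String) : List String :=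
  let h := block.length
  let w := PySem.List.maxD (block.map (fun l => l.toList.length)) id 0  -- max(lengths, default=0)
  let pad := pad_block block w
  let padL := pad.map String.toList
  let out0 := pad.map String.toList
  let res := (List.range h).foldl (fun out y =>
    (List.range w).foldl (fun out x =>
      if getcg padL y x ≠ ' ' then out
      else
        -- found-flag with break: once found, every remaining (dy,dx) iteration is skipped
        ((([-1,0,1] : List Int).foldl
            (fun (s : List (List Char) × Bool) dy =>
              ([-1,0,1] : List Int).foldl
                (fun (s : List (List Char) × Bool) dx =>
                  if s.2 then s
                  else if dy = 0 ∧ dx = 0 then s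
                  else if 0 ≤ (y:Int)+dy ∧ (y:Int)+dy < (h:Int) ∧ 0 ≤ (x:Int)+dx ∧ (x:Int)+dx < (w:Int)
                          ∧ getcg padL ((y:Int)+dy).toNat ((x:Int)+dx).toNat ≠ ' '  -- toNat only under 0 ≤ guard: exact
                  then (setcg s.1 y x '·', true) else s)
                s)
            (out, false)).1)) out) out0
  res.map (fun row => String.ofList row)

-- ===== PORT B =====
def offsets8 : List (Int × Int) := [(-1,-1),(-1,0),(-1,1),(0,-1),(0,1),(1,-1),(1,0),(1,1)]

def outline_block_alt (block : List String) : List String :=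
  let h := block.length
  let w := PySem.List.maxD (block.map (fun l => l.toList.length)) id 0
  let pad := block.map (fun line => String.ofList (line.toList ++ List.replicate (w - line.toList.length) ' '))
  let padL := pad.map String.toList
  let out0 := pad.map String.toList
  let res := (List.range h).foldl (fun out y =>
    (List.range w).foldl (fun out x =>
      if getcg padL y x = ' ' then out
      else offsets8.foldl (fun out d =>
        if 0 ≤ (y:Int)+d.1 ∧ (y:Int)+d.1 < (h:Int) ∧ 0 ≤ (x:Int)+d.2 ∧ (x:Int)+d.2 < (w:Int)
           ∧ getcg padL ((y:Int)+d.1).toNat ((x:Int)+d.2).toNat = ' '  -- toNat only under 0 ≤ guard: exact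
        then setcg out ((y:Int)+d.1).toNat ((x:Int)+d.2).toNat '·' else out) out) out) out0
  res.map (fun row => String.ofList row)

-- ===== PRECONDITION & SPEC =====
def Spec_outline_block (block : List String) (out : List String) : Prop := out = outline_block_alt block
instance (block : List String) (out : List String) : Decidable (Spec_outline_block block out) := by unfold Spec_outline_block; infer_instance

-- ===== CLAIM (what is proved, stated in full; the proofs are below) =====
def Claim_equal_outline_block : Prop := ∀ (block : List String), Dom_outline_block block → Spec_outline_block block (outline_block block)

-- ===== LEMMAS AND PROOFS =====

def Shape (g : List (List Char)) (H W : Nat) : Prop :=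
  g.length = H ∧ ∀ r ∈ g, r.length = W

-- the one write both loops perform: conditionally stamp '·' at a target cell
def wstep {α : Type} (cb : α → Bool) (t : α → Nat × Nat)
    (g : List (List Char)) (i : α) : List (List Char) :=
  if cb i then setcg g (t i).1 (t i).2 '·' else g

def pairsL (h w : Nat) : List (Nat × Nat) :=
  (List.range h).flatMap (fun y => (List.range w).map (Prod.mk y))

def tripsL (h w : Nat) : List ((Nat × Nat) × (Int × Int)) :=
  (pairsL h w).flatMap (fun p => offsets8.map (Prod.mk p))

def nbrQ (P : List (List Char)) (h w y x : Nat) (dy dx : Int) : Bool :=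
  (!decide (dy = 0 ∧ dx = 0)) &&
  decide (0 ≤ (y:Int)+dy ∧ (y:Int)+dy < (h:Int) ∧ 0 ≤ (x:Int)+dx ∧ (x:Int)+dx < (w:Int)
          ∧ getcg P ((y:Int)+dy).toNat ((x:Int)+dx).toNat ≠ ' ')

def cbA (P : List (List Char)) (h w : Nat) (p : Nat × Nat) : Bool :=
  (getcg P p.1 p.2 == ' ') &&
  (([-1,0,1] : List Int).any fun dy => ([-1,0,1] : List Int).any fun dx => nbrQ P h w p.1 p.2 dy dx)

def cbB (P : List (List Char)) (h w : Nat) (i : (Nat × Nat) × (Int × Int)) : Bool :=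
  decide (getcg P i.1.1 i.1.2 ≠ ' ') &&
  decide (0 ≤ (i.1.1:Int)+i.2.1 ∧ (i.1.1:Int)+i.2.1 < (h:Int) ∧ 0 ≤ (i.1.2:Int)+i.2.2 ∧ (i.1.2:Int)+i.2.2 < (w:Int)
          ∧ getcg P ((i.1.1:Int)+i.2.1).toNat ((i.1.2:Int)+i.2.2).toNat = ' ')

def tB (i : (Nat × Nat) × (Int × Int)) : Nat × Nat :=
  (((i.1.1:Int)+i.2.1).toNat, ((i.1.2:Int)+i.2.2).toNat)

theorem shape_setcg {g : List (List Char)} {H W : Nat} (hs : Shape g H W) (y x : Nat) (c : Char) :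
    Shape (setcg g y x c) H W := by
  obtain ⟨hl, hr⟩ := hs
  rcases Nat.lt_or_ge y g.length with hy | hy
  · refine ⟨by simpa [setcg] using hl, ?_⟩
    intro r hrm
    rcases List.mem_or_eq_of_mem_set hrm with hmem | rfl
    · exact hr r hmem
    · have hd : g.getD y [] = g[y] := by
        simp [List.getD_eq_getElem?_getD, List.getElem?_eq_getElem hy]
      rw [hd, List.length_set]
      exact hr _ (List.getElem_mem hy)
  · have : setcg g y x c = g := by
      simp [setcg, List.set_eq_of_length_le hy]
    rw [this]; exact ⟨hl, hr⟩

theorem getcg_setcg {g : List (List Char)} {H W : Nat} (hs : Shape g H W)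
    {y0 x0 : Nat} (hy0 : y0 < H) (hx0 : x0 < W) (c : Char) (y x : Nat) :
    getcg (setcg g y0 x0 c) y x = if y = y0 ∧ x = x0 then c else getcg g y x := by
  obtain ⟨hl, hr⟩ := hs
  have hyl : y0 < g.length := by omega
  have hrow : g.getD y0 [] = g[y0] := by
    simp [List.getD_eq_getElem?_getD, List.getElem?_eq_getElem hyl]
  have hxl : x0 < (g.getD y0 []).length := by
    rw [hrow, hr _ (List.getElem_mem hyl)]; omega
  unfold getcg setcg
  by_cases hyy : y = y0
  · subst hyy
    simp only [List.getD_eq_getElem?_getD, List.getElem?_set, hyl, if_pos trivial]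
    by_cases hxx : x = x0
    · subst hxx
      have hx' : x < (g[y]?.getD []).length := by
        rw [List.getElem?_eq_getElem hyl, Option.getD_some, ← hrow]
        exact hxl
      simp [hx']
    · simp [Ne.symm hxx, hxx]
  · simp [List.getD_eq_getElem?_getD, Ne.symm hyy, hyy]

theorem shape_foldl_wstep {α : Type} (cb : α → Bool) (t : α → Nat × Nat) {H W : Nat} :
    ∀ (L : List α) (g : List (List Char)), Shape g H W →
      Shape (L.foldl (wstep cb t) g) H W := by
  intro L
  induction L with
  | nil => intro g hs; simpa using hs
  | cons i L ih =>
    intro g hs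
    simp only [List.foldl_cons]
    apply ih
    unfold wstep
    by_cases hc : cb i = true
    · rw [if_pos hc]; exact shape_setcg hs _ _ _
    · simp [hc, hs]

theorem getcg_foldl_wstep {α : Type} [DecidableEq α] (cb : α → Bool) (t : α → Nat × Nat) {H W : Nat} :
    ∀ (L : List α) (g : List (List Char)), Shape g H W →
      (∀ i ∈ L, cb i = true → (t i).1 < H ∧ (t i).2 < W) →
      ∀ y x, y < H → x < W →
        getcg (L.foldl (wstep cb t) g) y x
          = if ∃ i, i ∈ L ∧ cb i = true ∧ t i = (y, x) then '·' else getcg g y x := by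
  intro L
  induction L with
  | nil => intro g hs hb y x hy hx; simp
  | cons i L ih =>
    intro g hs hb y x hy hx
    simp only [List.foldl_cons]
    by_cases hc : cb i = true
    · have hbi := hb i (by simp) hc
      have hs' : Shape (wstep cb t g i) H W := by
        unfold wstep; rw [if_pos hc]; exact shape_setcg hs _ _ _
      rw [ih _ hs' (fun j hj => hb j (by simp [hj])) y x hy hx]
      by_cases hE : ∃ j, j ∈ L ∧ cb j = true ∧ t j = (y, x)
      · rw [if_pos hE, if_pos]
        obtain ⟨j, hj1, hj2, hj3⟩ := hE
        exact ⟨j, by simp [hj1], hj2, hj3⟩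
      · rw [if_neg hE]
        unfold wstep
        rw [if_pos hc, getcg_setcg hs hbi.1 hbi.2]
        by_cases ht : t i = (y, x)
        · rw [if_pos (by rw [ht]; exact ⟨rfl, rfl⟩),
              if_pos ⟨i, by simp, hc, ht⟩]
        · have h1 : ¬(y = (t i).1 ∧ x = (t i).2) := by
            rintro ⟨a, b⟩
            exact ht (by rw [Prod.ext_iff]; exact ⟨a.symm, b.symm⟩)
          have h2 : ¬ ∃ j, j ∈ i :: L ∧ cb j = true ∧ t j = (y, x) := by
            rintro ⟨j, hm, hcb, htj⟩
            rcases List.mem_cons.1 hm with rfl | hm'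
            · exact ht htj
            · exact hE ⟨j, hm', hcb, htj⟩
          rw [if_neg h1, if_neg h2]
    · have hwg : wstep cb t g i = g := by simp [wstep, hc]
      rw [hwg, ih _ hs (fun j hj hcj => hb j (by simp [hj]) hcj) y x hy hx]
      have hiff : (∃ j, j ∈ i :: L ∧ cb j = true ∧ t j = (y, x))
          ↔ (∃ j, j ∈ L ∧ cb j = true ∧ t j = (y, x)) := by
        constructor
        · rintro ⟨j, hm, hcb, htj⟩
          rcases List.mem_cons.1 hm with rfl | hm'
          · exact absurd hcb hc
          · exact ⟨j, hm', hcb, htj⟩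
        · rintro ⟨j, hm, hcb, htj⟩
          exact ⟨j, by simp [hm], hcb, htj⟩
      simp only [hiff]


theorem flagfold {beta : Type} (Q : beta → Bool) (act : List (List Char) → List (List Char)) :
    ∀ (ds : List beta) (s : List (List Char) × Bool),
      ds.foldl (fun s d => if s.2 then s else if Q d then (act s.1, true) else s) s
        = if s.2 then s else if ds.any Q then (act s.1, true) else s := by
  intro ds
  induction ds with
  | nil => intro s; simp
  | cons d ds ih =>
    intro s
    obtain ⟨g, b⟩ := s
    cases b
    · by_cases hq : Q d = true <;> simp [hq, ih]
    · simp [ih]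

theorem foldl_ext {α γ : Type} (F G : γ → α → γ) (h : ∀ g a, F g a = G g a) :
    ∀ (L : List α) (g : γ), L.foldl F g = L.foldl G g := by
  have hFG : F = G := funext fun g => funext (h g)
  intro L g; rw [hFG]

theorem foldl_fix {α γ : Type} (F : γ → α → γ) (h : ∀ g a, F g a = g) :
    ∀ (L : List α) (g : γ), L.foldl F g = g := by
  intro L
  induction L with
  | nil => intro g; simp
  | cons a L ih => intro g; simp only [List.foldl_cons, h]; exact ih g

theorem nested_to_pairs (h w : Nat) (F : List (List Char) → Nat × Nat → List (List Char))
    (g : List (List Char)) :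
    (List.range h).foldl (fun out y => (List.range w).foldl (fun out x => F out (y, x)) out) g
      = (pairsL h w).foldl F g := by
  unfold pairsL
  rw [List.foldl_flatMap]
  simp only [List.foldl_map]

theorem pairs_to_trips (h w : Nat) (F : List (List Char) → (Nat × Nat) × Int × Int → List (List Char))
    (g : List (List Char)) :
    (pairsL h w).foldl (fun out p => offsets8.foldl (fun out d => F out (p, d)) out) g
      = (tripsL h w).foldl F g := by
  unfold tripsL
  rw [List.foldl_flatMap]
  simp only [List.foldl_map]

theorem A_cell (P : List (List Char)) (h w : Nat) (out : List (List Char)) (y x : Nat) :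
    (if getcg P y x ≠ ' ' then out
     else
       ((([-1,0,1] : List Int).foldl
           (fun (s : List (List Char) × Bool) dy =>
             ([-1,0,1] : List Int).foldl
               (fun (s : List (List Char) × Bool) dx =>
                 if s.2 then s
                 else if dy = 0 ∧ dx = 0 then s
                 else if 0 ≤ (y:Int)+dy ∧ (y:Int)+dy < (h:Int) ∧ 0 ≤ (x:Int)+dx ∧ (x:Int)+dx < (w:Int)
                         ∧ getcg P ((y:Int)+dy).toNat ((x:Int)+dx).toNat ≠ ' '
                 then (setcg s.1 y x '·', true) else s)
               s)
           (out, false)).1))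
      = wstep (cbA P h w) (fun p => p) out (y, x) := by
  have hin : ∀ dy : Int,
      (fun (s : List (List Char) × Bool) (dx : Int) =>
        if s.2 then s
        else if dy = 0 ∧ dx = 0 then s
        else if 0 ≤ (y:Int)+dy ∧ (y:Int)+dy < (h:Int) ∧ 0 ≤ (x:Int)+dx ∧ (x:Int)+dx < (w:Int)
                ∧ getcg P ((y:Int)+dy).toNat ((x:Int)+dx).toNat ≠ ' '
        then (setcg s.1 y x '·', true) else s)
      = (fun (s : List (List Char) × Bool) (dx : Int) =>
          if s.2 then s else if nbrQ P h w y x dy dx then (setcg s.1 y x '·', true) else s) := by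
    intro dy; funext s dx
    by_cases h0 : dy = 0 ∧ dx = 0 <;>
      by_cases hC : (0 ≤ (y:Int)+dy ∧ (y:Int)+dy < (h:Int) ∧ 0 ≤ (x:Int)+dx ∧ (x:Int)+dx < (w:Int)
          ∧ getcg P ((y:Int)+dy).toNat ((x:Int)+dx).toNat ≠ ' ') <;>
      simp [nbrQ, h0, hC]
  simp only [hin]
  have h2 : ∀ (dy : Int) (s : List (List Char) × Bool),
      ([-1,0,1] : List Int).foldl
        (fun (s : List (List Char) × Bool) (dx : Int) =>
          if s.2 then s else if nbrQ P h w y x dy dx then (setcg s.1 y x '·', true) else s) s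
        = if s.2 then s
          else if ([-1,0,1] : List Int).any (fun dx => nbrQ P h w y x dy dx)
          then (setcg s.1 y x '·', true) else s :=
    fun dy s => flagfold _ (fun g => setcg g y x '·') _ s
  simp only [h2]
  rw [flagfold (fun dy => ([-1,0,1] : List Int).any fun dx => nbrQ P h w y x dy dx)
        (fun g => setcg g y x '·') _ (out, false)]
  have hcbA : cbA P h w (y, x)
      = ((getcg P y x == ' ')
          && (([-1,0,1] : List Int).any fun dy =>
                ([-1,0,1] : List Int).any fun dx => nbrQ P h w y x dy dx)) := rfl
  by_cases hsp : getcg P y x = ' '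
  · rw [if_neg (fun hne => hne hsp)]
    by_cases hA : (([-1,0,1] : List Int).any fun dy =>
        ([-1,0,1] : List Int).any fun dx => nbrQ P h w y x dy dx) = true
    · rw [if_neg (by simp : ¬ ((out, false).2 = true)), if_pos hA]
      have hT : cbA P h w (y, x) = true := by rw [hcbA, hA]; simp [hsp]
      unfold wstep
      rw [hT]
      simp
    · rw [if_neg (by simp : ¬ ((out, false).2 = true)), if_neg hA]
      have hF : cbA P h w (y, x) = false := by
        rw [hcbA, Bool.eq_false_iff.mpr hA, Bool.and_false]
      unfold wstep
      rw [hF]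
      simp
  · rw [if_pos hsp]
    have hsp' : (getcg P y x == ' ') = false := by simpa using hsp
    have hF : cbA P h w (y, x) = false := by rw [hcbA, hsp', Bool.false_and]
    unfold wstep
    rw [hF]
    simp

theorem B_cell (P : List (List Char)) (h w : Nat) (out : List (List Char)) (y x : Nat) :
    (if getcg P y x = ' ' then out
     else offsets8.foldl (fun out d =>
        if 0 ≤ (y:Int)+d.1 ∧ (y:Int)+d.1 < (h:Int) ∧ 0 ≤ (x:Int)+d.2 ∧ (x:Int)+d.2 < (w:Int)
           ∧ getcg P ((y:Int)+d.1).toNat ((x:Int)+d.2).toNat = ' '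
        then setcg out ((y:Int)+d.1).toNat ((x:Int)+d.2).toNat '·' else out) out)
      = offsets8.foldl (fun out d => wstep (cbB P h w) tB out ((y, x), d)) out := by
  by_cases hsp : getcg P y x = ' '
  · rw [if_pos hsp]
    exact (foldl_fix _ (fun g d => by simp [wstep, cbB, hsp]) offsets8 out).symm
  · rw [if_neg hsp]
    refine foldl_ext _ _ (fun g d => ?_) offsets8 out
    by_cases hC : (0 ≤ (y:Int)+d.1 ∧ (y:Int)+d.1 < (h:Int) ∧ 0 ≤ (x:Int)+d.2 ∧ (x:Int)+d.2 < (w:Int)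
        ∧ getcg P ((y:Int)+d.1).toNat ((x:Int)+d.2).toNat = ' ') <;>
      simp [wstep, cbB, tB, hsp, hC]

theorem A_grid (P : List (List Char)) (h w : Nat) (g0 : List (List Char)) :
    (List.range h).foldl (fun out y =>
      (List.range w).foldl (fun out x =>
        if getcg P y x ≠ ' ' then out
        else
          ((([-1,0,1] : List Int).foldl
              (fun (s : List (List Char) × Bool) dy =>
                ([-1,0,1] : List Int).foldl
                  (fun (s : List (List Char) × Bool) dx =>
                    if s.2 then s
                    else if dy = 0 ∧ dx = 0 then s
                    else if 0 ≤ (y:Int)+dy ∧ (y:Int)+dy < (h:Int) ∧ 0 ≤ (x:Int)+dx ∧ (x:Int)+dx < (w:Int)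
                            ∧ getcg P ((y:Int)+dy).toNat ((x:Int)+dx).toNat ≠ ' '
                    then (setcg s.1 y x '·', true) else s)
                  s)
              (out, false)).1)) out) g0
      = (pairsL h w).foldl (wstep (cbA P h w) (fun p => p)) g0 := by
  have step1 := nested_to_pairs h w (fun out p =>
    if getcg P p.1 p.2 ≠ ' ' then out
    else
      ((([-1,0,1] : List Int).foldl
          (fun (s : List (List Char) × Bool) dy =>
            ([-1,0,1] : List Int).foldl
              (fun (s : List (List Char) × Bool) dx =>
                if s.2 then s
                else if dy = 0 ∧ dx = 0 then s
                else if 0 ≤ (p.1:Int)+dy ∧ (p.1:Int)+dy < (h:Int) ∧ 0 ≤ (p.2:Int)+dx ∧ (p.2:Int)+dx < (w:Int)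
                        ∧ getcg P ((p.1:Int)+dy).toNat ((p.2:Int)+dx).toNat ≠ ' '
                then (setcg s.1 p.1 p.2 '·', true) else s)
              s)
          (out, false)).1)) g0
  refine step1.trans ?_
  congr 1
  funext out p
  obtain ⟨y, x⟩ := p
  exact A_cell P h w out y x

theorem B_grid (P : List (List Char)) (h w : Nat) (g0 : List (List Char)) :
    (List.range h).foldl (fun out y =>
      (List.range w).foldl (fun out x =>
        if getcg P y x = ' ' then out
        else offsets8.foldl (fun out d =>
          if 0 ≤ (y:Int)+d.1 ∧ (y:Int)+d.1 < (h:Int) ∧ 0 ≤ (x:Int)+d.2 ∧ (x:Int)+d.2 < (w:Int)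
             ∧ getcg P ((y:Int)+d.1).toNat ((x:Int)+d.2).toNat = ' '
          then setcg out ((y:Int)+d.1).toNat ((x:Int)+d.2).toNat '·' else out) out) out) g0
      = (tripsL h w).foldl (wstep (cbB P h w) tB) g0 := by
  have step1 := nested_to_pairs h w (fun out p =>
    if getcg P p.1 p.2 = ' ' then out
    else offsets8.foldl (fun out d =>
      if 0 ≤ (p.1:Int)+d.1 ∧ (p.1:Int)+d.1 < (h:Int) ∧ 0 ≤ (p.2:Int)+d.2 ∧ (p.2:Int)+d.2 < (w:Int)
         ∧ getcg P ((p.1:Int)+d.1).toNat ((p.2:Int)+d.2).toNat = ' '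
      then setcg out ((p.1:Int)+d.1).toNat ((p.2:Int)+d.2).toNat '·' else out) out) g0
  refine step1.trans ?_
  rw [← pairs_to_trips h w (wstep (cbB P h w) tB) g0]
  congr 1
  funext out p
  obtain ⟨y, x⟩ := p
  exact B_cell P h w out y x

theorem mem_pairsL (h w : Nat) (p : Nat × Nat) : p ∈ pairsL h w ↔ p.1 < h ∧ p.2 < w := by
  obtain ⟨a, b⟩ := p
  simp only [pairsL, List.mem_flatMap, List.mem_map, List.mem_range, Prod.mk.injEq]
  constructor
  · rintro ⟨y, hy, x, hx, rfl, rfl⟩; exact ⟨hy, hx⟩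
  · rintro ⟨ha, hb⟩; exact ⟨a, ha, b, hb, rfl, rfl⟩

theorem mem_offsets8_iff (d : Int × Int) :
    d ∈ offsets8 ↔ (-1 ≤ d.1 ∧ d.1 ≤ 1 ∧ -1 ≤ d.2 ∧ d.2 ≤ 1 ∧ ¬(d.1 = 0 ∧ d.2 = 0)) := by
  obtain ⟨a, b⟩ := d
  simp only [offsets8, List.mem_cons, List.not_mem_nil, or_false, Prod.mk.injEq]
  omega

theorem mem_tripsL (h w : Nat) (i : (Nat × Nat) × Int × Int) :
    i ∈ tripsL h w ↔ (i.1.1 < h ∧ i.1.2 < w ∧ i.2 ∈ offsets8) := by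
  obtain ⟨p, d⟩ := i
  simp only [tripsL, List.mem_flatMap, List.mem_map, Prod.mk.injEq]
  constructor
  · rintro ⟨q, hq, e, he, rfl, rfl⟩
    rw [mem_pairsL] at hq
    exact ⟨hq.1, hq.2, he⟩
  · rintro ⟨h1, h2, h3⟩
    exact ⟨p, (mem_pairsL h w p).2 ⟨h1, h2⟩, d, h3, rfl, rfl⟩

theorem cond_iff (P : List (List Char)) (h w y x : Nat) (hy : y < h) (hx : x < w) :
    (∃ p, p ∈ pairsL h w ∧ cbA P h w p = true ∧ p = (y, x))
      ↔ (∃ i, i ∈ tripsL h w ∧ cbB P h w i = true ∧ tB i = (y, x)) := by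
  constructor
  · rintro ⟨p, _, hcb, rfl⟩
    simp only [cbA, Bool.and_eq_true, beq_iff_eq, List.any_eq_true] at hcb
    obtain ⟨hsp, dy, hdy, dx, hdx, hq⟩ := hcb
    simp only [nbrQ, Bool.and_eq_true, Bool.not_eq_eq_eq_not, Bool.not_true,
      decide_eq_false_iff_not, decide_eq_true_eq] at hq
    obtain ⟨h00, hb1, hb2, hb3, hb4, hns⟩ := hq
    have hdy' : -1 ≤ dy ∧ dy ≤ 1 := by simp only [List.mem_cons, List.not_mem_nil, or_false] at hdy; omega
    have hdx' : -1 ≤ dx ∧ dx ≤ 1 := by simp only [List.mem_cons, List.not_mem_nil, or_false] at hdx; omega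
    refine ⟨((((y:Int)+dy).toNat, ((x:Int)+dx).toNat), (-dy, -dx)), ?_, ?_, ?_⟩
    · rw [mem_tripsL, mem_offsets8_iff]
      show ((y:Int)+dy).toNat < h ∧ ((x:Int)+dx).toNat < w ∧
        (-1 ≤ -dy ∧ -dy ≤ 1 ∧ -1 ≤ -dx ∧ -dx ≤ 1 ∧ ¬(-dy = 0 ∧ -dx = 0))
      refine ⟨by omega, by omega, by omega⟩
    · simp only [cbB, Bool.and_eq_true, decide_eq_true_eq]
      have e1 : ((((y:Int)+dy).toNat : Int) + -dy) = (y:Int) := by omega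
      have e2 : ((((x:Int)+dx).toNat : Int) + -dx) = (x:Int) := by omega
      refine ⟨hns, ?_⟩
      rw [e1, e2]
      refine ⟨by omega, by omega, by omega, by omega, ?_⟩
      simpa using hsp
    · simp only [tB, Prod.mk.injEq]
      constructor <;> omega
  · rintro ⟨⟨⟨sy, sx⟩, dy, dx⟩, hmem, hcb, htb⟩
    rw [mem_tripsL] at hmem
    obtain ⟨hsy, hsx, hd8⟩ := hmem
    rw [mem_offsets8_iff] at hd8
    simp only [cbB, Bool.and_eq_true, decide_eq_true_eq] at hcb
    obtain ⟨hsrc, hb1, hb2, hb3, hb4, htar⟩ := hcb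
    simp only [tB, Prod.mk.injEq] at htb
    obtain ⟨hty, htx⟩ := htb
    simp only at hsy hsx hd8 hsrc hb1 hb2 hb3 hb4 htar hty htx
    refine ⟨(y, x), (mem_pairsL h w (y, x)).2 ⟨hy, hx⟩, ?_, rfl⟩
    simp only [cbA, Bool.and_eq_true, beq_iff_eq, List.any_eq_true]
    constructor
    · rw [← hty, ← htx]; exact htar
    · refine ⟨-dy, by simp only [List.mem_cons, List.not_mem_nil, or_false]; omega,
              -dx, by simp only [List.mem_cons, List.not_mem_nil, or_false]; omega, ?_⟩
      simp only [nbrQ, Bool.and_eq_true, Bool.not_eq_eq_eq_not, Bool.not_true,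
        decide_eq_false_iff_not, decide_eq_true_eq]
      have ey : (y:Int) + -dy = (sy:Int) := by omega
      have ex : (x:Int) + -dx = (sx:Int) := by omega
      refine ⟨by omega, ?_⟩
      rw [ey, ex]
      refine ⟨by omega, by omega, by omega, by omega, ?_⟩
      simpa using hsrc

theorem getcg_eq_getElem (g : List (List Char)) (y x : Nat) (hy : y < g.length)
    (hx : x < g[y].length) : getcg g y x = g[y][x] := by
  simp [getcg, List.getD_eq_getElem?_getD, List.getElem?_eq_getElem hy,
    List.getElem?_eq_getElem hx]

theorem grids_eq {g1 g2 : List (List Char)} {H W : Nat} (s1 : Shape g1 H W) (s2 : Shape g2 H W)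
    (hc : ∀ y, y < H → ∀ x, x < W → getcg g1 y x = getcg g2 y x) : g1 = g2 := by
  apply List.ext_getElem (by rw [s1.1, s2.1])
  intro i hi1 hi2
  have hW1 : g1[i].length = W := s1.2 _ (List.getElem_mem hi1)
  have hW2 : g2[i].length = W := s2.2 _ (List.getElem_mem hi2)
  apply List.ext_getElem (by rw [hW1, hW2])
  intro j hj1 hj2
  have hc' := hc i (by rw [← s1.1]; exact hi1) j (by rw [hW1] at hj1; exact hj1)
  rw [getcg_eq_getElem g1 i j hi1 hj1, getcg_eq_getElem g2 i j hi2 hj2] at hc'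
  exact hc'

theorem shape_padL (block : List String) (w : Nat) (hw : ∀ l ∈ block, l.toList.length ≤ w) :
    Shape ((pad_block block w).map String.toList) block.length w := by
  constructor
  · simp [pad_block]
  · intro r hr
    simp only [pad_block, List.map_map, List.mem_map, Function.comp] at hr
    obtain ⟨line, hline, rfl⟩ := hr
    rw [String.toList_ofList]
    have := hw line hline
    simp only [List.length_append, List.length_replicate]
    omega

theorem foldl_preserve_some {α β : Type} (f : Option β → α → Option β)
    (hf : ∀ (b : β) (a : α), (f (some b) a).isSome) :
    ∀ (t : List α) (b : β), (t.foldl f (some b)).isSome := by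
  intro t
  induction t with
  | nil => intro b; simp
  | cons c t ih =>
    intro b
    simp only [List.foldl_cons]
    obtain ⟨b', hb'⟩ := Option.isSome_iff_exists.1 (hf b c)
    rw [hb']
    exact ih b'

theorem le_maxD (xs : List Nat) (a : Nat) (ha : a ∈ xs) : a ≤ PySem.List.maxD xs id 0 := by
  unfold PySem.List.maxD
  cases hm : PySem.List.max? xs id with
  | none =>
    exfalso
    cases xs with
    | nil => simp at ha
    | cons b t =>
      unfold PySem.List.max? at hm
      simp only [List.foldl_cons] at hm
      exact Option.isSome_iff_ne_none.mp
        (foldl_preserve_some _ (fun m c => by dsimp only; split <;> rfl) t b) hm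
  | some m =>
    simp only [Option.getD_some]
    exact PySem.List.max?_isMax hm a ha

-- ===== VERDICT (by name: the statement is the Claim_ definition above) =====
theorem outline_block_spec : Claim_equal_outline_block := by
  intro block _hd
  show outline_block block = outline_block_alt block
  have hw : ∀ l ∈ block, l.toList.length ≤ PySem.List.maxD (block.map (fun l => l.toList.length)) id 0 :=
    fun l hl => le_maxD _ _ (List.mem_map_of_mem hl)
  have hshape := shape_padL block _ hw
  unfold outline_block outline_block_alt
  dsimp only
  rw [show (block.map (fun line => String.ofList (line.toList ++ List.replicate
        ((PySem.List.maxD (block.map (fun l => l.toList.length)) id 0) - line.toList.length) ' ')))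
      = pad_block block (PySem.List.maxD (block.map (fun l => l.toList.length)) id 0) from rfl]
  rw [A_grid ((pad_block block (PySem.List.maxD (block.map (fun l => l.toList.length)) id 0)).map String.toList)
        block.length (PySem.List.maxD (block.map (fun l => l.toList.length)) id 0),
      B_grid ((pad_block block (PySem.List.maxD (block.map (fun l => l.toList.length)) id 0)).map String.toList)
        block.length (PySem.List.maxD (block.map (fun l => l.toList.length)) id 0)]
  refine congrArg _ (grids_eq (shape_foldl_wstep _ _ _ _ hshape) (shape_foldl_wstep _ _ _ _ hshape) ?_)
  intro y hy x hx
  rw [getcg_foldl_wstep _ _ _ _ hshape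
        (fun p hp _ => by rw [mem_pairsL] at hp; exact hp) y x hy hx,
      getcg_foldl_wstep _ _ _ _ hshape
        (fun i _ hc => by
          simp only [cbB, Bool.and_eq_true, decide_eq_true_eq] at hc
          simp only [tB]
          exact ⟨by omega, by omega⟩) y x hy hx]
  simp only [cond_iff _ _ _ y x hy hx]
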